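-- pv_equiv track=rewrite | github.com/StevenBlack/hosts | updateHostsFile.py | sort_sources
-- ===== SOURCE A (Python) =====
-- def sort_sources(sources):
--     """
--     Sorts the sources.
--     The idea is that all Steven Black's list, file or entries
--     get on top and the rest sorted alphabetically.
--
--     Parameters
--     ----------
--     sources: list
--         The sources to sort.
--     """
--
--     result = sorted(
--         sources.copy(),
--         key=lambda x: x.lower().replace("-", "").replace("_", "").replace(" ", ""),
--     )
--
--     # Steven Black's repositories/files/lists should be on top!
--     stevenblackpositions = [
--         x for x, y in enumerate(result) if "stevenblack" in y.lower()
--     ]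
--
--     for index in stevenblackpositions:
--         result.insert(0, result.pop(index))
--
--     return result
-- ===== SOURCE B (Python) =====
-- def sort_sources(sources):
--     """
--     Sorts the sources: all Steven Black entries on top, rest alphabetically.
--     """
--     result = sorted(
--         sources,
--         key=lambda x: x.lower().replace("-", "").replace("_", "").replace(" ", ""),
--     )
--     front, back = [], []
--     for x in result:
--         if "stevenblack" in x.lower():
--             front.insert(0, x)
--         else:
--             back.append(x)
--     return front + back
-- ===== Notes on version B (the rewrite author's own statement) =====
-- stated objective: simpler
-- what changed: Replaces A's index-collection over enumerate followed by repeated in-place pop/insert(0) reordering with a single pass that partitions the sorted list into a prepended 'front' (stevenblack) list and an appended 'back' list, returned as front + back.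
import Mathlib
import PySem

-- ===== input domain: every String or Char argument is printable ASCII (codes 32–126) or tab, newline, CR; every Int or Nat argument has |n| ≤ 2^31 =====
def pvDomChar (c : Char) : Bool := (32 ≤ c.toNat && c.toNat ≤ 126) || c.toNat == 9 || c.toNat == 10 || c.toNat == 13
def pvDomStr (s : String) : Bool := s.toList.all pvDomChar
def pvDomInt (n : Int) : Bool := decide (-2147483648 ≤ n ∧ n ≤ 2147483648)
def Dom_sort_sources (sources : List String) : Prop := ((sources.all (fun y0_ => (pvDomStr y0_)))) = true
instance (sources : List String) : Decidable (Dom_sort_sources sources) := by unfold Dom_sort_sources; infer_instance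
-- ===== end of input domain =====

-- B keeps A's sort key but replaces A's enumerate-index collection plus repeated pop/insert(0)
-- reordering with a one-pass partition into a prepended front list and an appended back list (simpler).

-- ===== PORT A =====
-- shared sort key: x.lower().replace("-","").replace("_","").replace(" ","")
def pvKey (x : String) : String :=
  PySem.Str.replace (PySem.Str.replace (PySem.Str.replace (PySem.Str.lower x) "-" "") "_" "") " " ""

-- "stevenblack" in x.lower()
def pvSB (x : String) : Bool := PySem.Str.isIn "stevenblack" (PySem.Str.lower x)

def sort_sources (sources : List String) : List String :=
  let result := PySem.List.sorted sources (fun x => pvKey x) false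
  let stevenblackpositions :=
    ((PySem.List.enumerate result 0).filter (fun p => pvSB p.2)).map (fun p => p.1)
  stevenblackpositions.foldl (fun l index =>
    match PySem.List.pop? l index with
    | some (v, l') => PySem.List.insert l' 0 v   -- result.insert(0, result.pop(index))
    | none => l)                                  -- unreachable: every position is in range
    result

-- ===== PORT B =====
def sort_sources_alt (sources : List String) : List String :=
  let result := PySem.List.sorted sources (fun x => pvKey x) false
  let fb := result.foldl
    (fun (fb : List String × List String) x =>
      if pvSB x then (x :: fb.1, fb.2) else (fb.1, fb.2 ++ [x]))
    ([], [])
  fb.1 ++ fb.2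

-- ===== PRECONDITION & SPEC =====
def Spec_sort_sources (sources : List String) (out : List String) : Prop := out = sort_sources_alt sources
instance (sources : List String) (out : List String) : Decidable (Spec_sort_sources sources out) := by unfold Spec_sort_sources; infer_instance

-- ===== CLAIM (what is proved, stated in full; the proofs are below) =====
def Claim_equal_sort_sources : Prop := ∀ (sources : List String), Dom_sort_sources sources → Spec_sort_sources sources (sort_sources sources)

-- ===== LEMMAS AND PROOFS =====

-- B's fold partitions the list.
theorem b_fold (l : List String) (f b : List String) :
    l.foldl (fun (fb : List String × List String) x =>
        if pvSB x then (x :: fb.1, fb.2) else (fb.1, fb.2 ++ [x])) (f, b)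
      = ((l.filter pvSB).reverse ++ f, b ++ l.filter (fun x => !pvSB x)) := by
  induction l generalizing f b with
  | nil => simp
  | cons x t ih =>
    by_cases h : pvSB x = true <;>
      simp [List.foldl_cons, h, ih]

-- A's position list from enumerate starting at s.
theorem positions_cons (x : String) (t : List String) (s : Int) :
    ((PySem.List.enumerate (x :: t) s).filter (fun p => pvSB p.2)).map (fun p => p.1)
      = (if pvSB x then [s] else [])
        ++ ((PySem.List.enumerate t (s + 1)).filter (fun p => pvSB p.2)).map (fun p => p.1) := by
  by_cases h : pvSB x = true <;> simp [PySem.List.enumerate_cons, h]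

-- the middle element of acc ++ x :: t is erased by eraseIdx at acc.length
theorem erase_mid (acc t : List String) (x : String) :
    (acc ++ x :: t).eraseIdx acc.length = acc ++ t := by
  induction acc with
  | nil => rfl
  | cons a as ih => simp [ih]

-- one pop/insert step at index acc.length on acc ++ x :: t
theorem step_at (acc t : List String) (x : String) :
    (match PySem.List.pop? (acc ++ x :: t) (acc.length : Int) with
      | some (v, l') => PySem.List.insert l' 0 v
      | none => (acc ++ x :: t))
      = x :: (acc ++ t) := by
  rw [PySem.List.pop?_natCast (acc ++ x :: t) acc.length (by simp)]
  simp [PySem.List.insert_zero, List.getElem_append_right (Nat.le_refl acc.length),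
    erase_mid]

-- A's loop invariant: processing the positions of tail (offset by acc.length) on acc ++ tail
theorem a_loop (tail : List String) (acc : List String) :
    (((PySem.List.enumerate tail (acc.length : Int)).filter (fun p => pvSB p.2)).map (fun p => p.1)).foldl
      (fun l index =>
        match PySem.List.pop? l index with
        | some (v, l') => PySem.List.insert l' 0 v
        | none => l)
      (acc ++ tail)
      = (tail.filter pvSB).reverse ++ acc ++ tail.filter (fun x => !pvSB x) := by
  induction tail generalizing acc with
  | nil => simp [PySem.List.enumerate_nil]
  | cons x t ih =>
    rw [positions_cons]
    by_cases h : pvSB x = true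
    · rw [if_pos h, List.singleton_append]
      simp only [List.foldl_cons]
      rw [step_at acc t x]
      have hcast : (acc.length : Int) + 1 = ((x :: acc).length : Int) := by simp
      rw [hcast, show x :: (acc ++ t) = (x :: acc) ++ t from rfl, ih (x :: acc)]
      simp [h, List.append_assoc]
    · rw [if_neg h, List.nil_append]
      have hcast : (acc.length : Int) + 1 = ((acc ++ [x]).length : Int) := by simp
      rw [hcast, show acc ++ x :: t = (acc ++ [x]) ++ t by simp, ih (acc ++ [x])]
      simp [h, List.append_assoc]

-- ===== VERDICT (by name: the statement is the Claim_ definition above) =====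
theorem sort_sources_spec : Claim_equal_sort_sources := by
  intro sources _
  unfold Spec_sort_sources sort_sources sort_sources_alt
  simp only [b_fold]
  have h := a_loop (PySem.List.sorted sources (fun x => pvKey x) false) []
  simp only [List.length_nil, Int.natCast_zero, List.nil_append, List.append_nil] at h
  simp only [h, List.nil_append, List.append_nil]
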